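-- pv_equiv track=rewrite | github.com/Parth-Ramanujj/ai-outfit-fitcheck | app1.py | sanitize_final
-- ===== SOURCE A (Python) =====
-- def sanitize_final(result: dict) -> dict:
--     result["what_works"] = result.get("what_works", [])[:3]
--     result["what_needs_work"] = result.get("what_needs_work", [])[:2]
--     result["suggestions"] = result.get("suggestions", [])[:2]
--
--     filler_works = [
--         "The visible clothing pieces coordinate well together.",
--         "The outfit elements appear visually consistent.",
--         "The garments create a balanced overall appearance."
--     ]
--     i = 0
--     while len(result["what_works"]) < 3:
--         result["what_works"].append(filler_works[i % len(filler_works)])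
--         i += 1
--
--     while len(result["what_needs_work"]) < 2:
--         result["what_needs_work"].append("No clearly visible fit issues are present.")
--
--     while len(result["suggestions"]) < 2:
--         result["suggestions"].append("No changes are required based on visible elements.")
--
--     return result
-- ===== SOURCE B (Python) =====
-- def sanitize_final(result: dict) -> dict:
--     filler_works = [
--         "The visible clothing pieces coordinate well together.",
--         "The outfit elements appear visually consistent.",
--         "The garments create a balanced overall appearance."
--     ]
--     result["what_works"] = (result.get("what_works", [])[:3] + filler_works)[:3]
--     result["what_needs_work"] = (result.get("what_needs_work", [])[:2]
--                                  + ["No clearly visible fit issues are present."] * 2)[:2]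
--     result["suggestions"] = (result.get("suggestions", [])[:2]
--                              + ["No changes are required based on visible elements."] * 2)[:2]
--     return result
-- ===== Notes on version B (the rewrite author's own statement) =====
-- stated objective: simpler
-- what changed: Replaces the truncate-then-while-append padding loops (with a cyclic filler index) by a single closed-form slice-concatenate-slice per key, assigning each key once.
import Mathlib
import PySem

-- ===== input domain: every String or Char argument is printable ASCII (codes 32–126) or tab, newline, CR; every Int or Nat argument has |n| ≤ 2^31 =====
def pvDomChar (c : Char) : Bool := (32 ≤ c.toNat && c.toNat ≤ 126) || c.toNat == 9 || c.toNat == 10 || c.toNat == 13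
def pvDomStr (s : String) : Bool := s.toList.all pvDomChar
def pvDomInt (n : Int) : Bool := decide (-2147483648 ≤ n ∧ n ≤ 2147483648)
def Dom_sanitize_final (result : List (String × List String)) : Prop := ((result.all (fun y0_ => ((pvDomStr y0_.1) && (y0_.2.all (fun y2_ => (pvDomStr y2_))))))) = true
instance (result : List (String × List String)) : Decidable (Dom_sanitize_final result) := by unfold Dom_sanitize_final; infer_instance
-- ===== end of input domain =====

-- B replaces A's truncate-then-while-append padding loops with one closed-form
-- slice-concatenate-slice per key (objective: simpler). A mutates its argument dict in
-- place and returns it; the equivalence proved here is about the RETURN value only.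

-- ===== PORT A =====
def pvFillerWorks : List String :=
  ["The visible clothing pieces coordinate well together.",
   "The outfit elements appear visually consistent.",
   "The garments create a balanced overall appearance."]

-- while len(xs) < 3: xs.append(filler_works[i % len(filler_works)]); i += 1
-- (filler_works[i % 3] is always in range, so pyGet? never returns none; .getD "" is unreachable)
def pvPadWorks (xs : List String) (i : Int) : List String :=
  if xs.length < 3 then
    pvPadWorks (xs ++ [(PySem.List.pyGet? pvFillerWorks (PySem.Int.mod i 3)).getD ""]) (i + 1)
  else xs
termination_by 3 - xs.length
decreasing_by simp_all; omega

-- while len(xs) < n: xs.append(s)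
def pvPadConst (xs : List String) (n : Nat) (s : String) : List String :=
  if xs.length < n then pvPadConst (xs ++ [s]) n s else xs
termination_by n - xs.length
decreasing_by simp_all; omega

def sanitize_final (result : List (String × List String)) : List (String × List String) :=
  let d0 := PySem.Dict.mk result
  let d1 := d0.insert "what_works" (PySem.List.slice (d0.getD "what_works" []) none (some 3))
  let d2 := d1.insert "what_needs_work" (PySem.List.slice (d1.getD "what_needs_work" []) none (some 2))
  let d3 := d2.insert "suggestions" (PySem.List.slice (d2.getD "suggestions" []) none (some 2))
  -- the while loops append to the list objects stored in the dict
  let d4 := d3.insert "what_works" (pvPadWorks (d3.getD "what_works" []) 0)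
  let d5 := d4.insert "what_needs_work" (pvPadConst (d4.getD "what_needs_work" []) 2 "No clearly visible fit issues are present.")
  let d6 := d5.insert "suggestions" (pvPadConst (d5.getD "suggestions" []) 2 "No changes are required based on visible elements.")
  d6.items

-- ===== PORT B =====
def sanitize_final_alt (result : List (String × List String)) : List (String × List String) :=
  let d0 := PySem.Dict.mk result
  let d1 := d0.insert "what_works"
      (PySem.List.slice ((PySem.List.slice (d0.getD "what_works" []) none (some 3)) ++ pvFillerWorks) none (some 3))
  let d2 := d1.insert "what_needs_work"
      (PySem.List.slice ((PySem.List.slice (d1.getD "what_needs_work" []) none (some 2))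
        ++ ["No clearly visible fit issues are present.", "No clearly visible fit issues are present."]) none (some 2))
  let d3 := d2.insert "suggestions"
      (PySem.List.slice ((PySem.List.slice (d2.getD "suggestions" []) none (some 2))
        ++ ["No changes are required based on visible elements.", "No changes are required based on visible elements."]) none (some 2))
  d3.items

-- ===== PRECONDITION & SPEC =====
def Spec_sanitize_final (result : List (String × List String)) (out : List (String × List String)) : Prop := out = sanitize_final_alt result
instance (result : List (String × List String)) (out : List (String × List String)) : Decidable (Spec_sanitize_final result out) := by unfold Spec_sanitize_final; infer_instance

-- ===== CLAIM (what is proved, stated in full; the proofs are below) =====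
def Claim_equal_sanitize_final : Prop := ∀ (result : List (String × List String)), Dom_sanitize_final result → Spec_sanitize_final result (sanitize_final result)

-- ===== LEMMAS AND PROOFS =====

-- the two overwrite maps at distinct keys commute
theorem pv_map_overwrite_comm {κ ν : Type} [BEq κ] [LawfulBEq κ]
    (l : List (κ × ν)) (k k' : κ) (h : k ≠ k') (v' : ν) (w : ν) :
    (l.map (fun p => if p.1 == k' then (k', v') else p)).map (fun p => if p.1 == k then (k, w) else p)
    = (l.map (fun p => if p.1 == k then (k, w) else p)).map (fun p => if p.1 == k' then (k', v') else p) := by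
  induction l with
  | nil => rfl
  | cons p t ih =>
    simp only [List.map_cons, ih]
    congr 1
    by_cases h1 : p.1 = k <;> by_cases h2 : p.1 = k' <;> simp_all [beq_iff_eq]

-- overwriting key k in place does not change which other keys are present
theorem pv_contains_map_overwrite {κ ν : Type} [BEq κ] [LawfulBEq κ]
    (l : List (κ × ν)) (k k' : κ) (h : k ≠ k') (w : ν) :
    (l.map (fun p => if p.1 == k then (k, w) else p)).any (fun p => p.1 == k')
      = l.any (fun p => p.1 == k') := by
  induction l with
  | nil => rfl
  | cons p t ih =>
    by_cases h1 : p.1 = k <;> simp_all [beq_iff_eq]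
    try exact fun hk => (h hk).elim

-- overwriting an already-present key commutes (as dicts) with an insert at a different key
theorem pv_insert_overwrite_comm {κ ν : Type} [BEq κ] [LawfulBEq κ]
    (d : PySem.Dict κ ν) (k k' : κ) (h : k ≠ k') (hc : d.contains k = true)
    (v' : ν) (w : ν) :
    (d.insert k' v').insert k w = (d.insert k w).insert k' v' := by
  obtain ⟨l⟩ := d
  by_cases hc' : (PySem.Dict.mk l).contains k' = true
  · simp only [PySem.Dict.insert, PySem.Dict.contains] at *
    simp [hc, hc', pv_contains_map_overwrite l k k' h, pv_contains_map_overwrite l k' k h.symm,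
          pv_map_overwrite_comm l k k' h v' w]
  · simp only [PySem.Dict.insert, PySem.Dict.contains] at *
    simp only [Bool.not_eq_true] at hc'
    simp [hc, hc', pv_contains_map_overwrite l k k' h, beq_iff_eq, h.symm,
          List.any_append]

-- collapsing A's six inserts (each key written twice) to B's three
theorem pv_chain (d0 : PySem.Dict String (List String)) (t1 t2 t3 w x y : List String) :
    (((((d0.insert "what_works" t1).insert "what_needs_work" t2).insert "suggestions" t3).insert "what_works" w).insert "what_needs_work" x).insert "suggestions" y
    = ((d0.insert "what_works" w).insert "what_needs_work" x).insert "suggestions" y := by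
  have c1 : ((d0.insert "what_works" t1).insert "what_needs_work" t2).contains "what_works" = true := by
    simp [PySem.Dict.contains_insert, PySem.Dict.contains_insert_self]
  rw [pv_insert_overwrite_comm _ "what_works" "suggestions" (by decide) c1,
      pv_insert_overwrite_comm _ "what_works" "what_needs_work" (by decide) (PySem.Dict.contains_insert_self d0 _ _),
      PySem.Dict.insert_insert_self,
      pv_insert_overwrite_comm _ "what_needs_work" "suggestions" (by decide) (PySem.Dict.contains_insert_self _ _ _),
      PySem.Dict.insert_insert_self, PySem.Dict.insert_insert_self]

theorem pv_len_slice3 (xs : List String) : (PySem.List.slice xs none (some 3)).length ≤ 3 := by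
  simp [PySem.List.slice, PySem.List.clampIdx]

theorem pv_len_slice2 (xs : List String) : (PySem.List.slice xs none (some 2)).length ≤ 2 := by
  simp [PySem.List.slice, PySem.List.clampIdx]

theorem pv_padWorks_eq (xs : List String) (h : xs.length ≤ 3) :
    pvPadWorks xs 0 = PySem.List.slice (xs ++ pvFillerWorks) none (some 3) := by
  match xs, h with
  | [], _ => simp [pvPadWorks, PySem.List.slice, PySem.List.clampIdx, pvFillerWorks, PySem.List.pyGet?, PySem.List.pyIdx?, PySem.Int.mod]
  | [a], _ => simp [pvPadWorks, PySem.List.slice, PySem.List.clampIdx, pvFillerWorks, PySem.List.pyGet?, PySem.List.pyIdx?, PySem.Int.mod]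
  | [a,b], _ => simp [pvPadWorks, PySem.List.slice, PySem.List.clampIdx, pvFillerWorks, PySem.List.pyGet?, PySem.List.pyIdx?, PySem.Int.mod]
  | [a,b,c], _ => simp [pvPadWorks, PySem.List.slice, PySem.List.clampIdx, pvFillerWorks]

theorem pv_padConst_eq (xs : List String) (s : String) (h : xs.length ≤ 2) :
    pvPadConst xs 2 s = PySem.List.slice (xs ++ [s, s]) none (some 2) := by
  match xs, h with
  | [], _ => simp [pvPadConst, PySem.List.slice, PySem.List.clampIdx]
  | [a], _ => simp [pvPadConst, PySem.List.slice, PySem.List.clampIdx]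
  | [a,b], _ => simp [pvPadConst, PySem.List.slice, PySem.List.clampIdx]

-- ===== VERDICT (by name: the statement is the Claim_ definition above) =====
theorem sanitize_final_spec : Claim_equal_sanitize_final := by
  intro result _
  unfold Spec_sanitize_final
  simp only [sanitize_final, sanitize_final_alt]
  simp only [PySem.Dict.getD_insert_self,
    PySem.Dict.getD_insert_of_ne _ _ _ (by decide : ("what_needs_work":String) ≠ "what_works"),
    PySem.Dict.getD_insert_of_ne _ _ _ (by decide : ("suggestions":String) ≠ "what_works"),
    PySem.Dict.getD_insert_of_ne _ _ _ (by decide : ("suggestions":String) ≠ "what_needs_work"),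
    PySem.Dict.getD_insert_of_ne _ _ _ (by decide : ("what_works":String) ≠ "what_needs_work"),
    PySem.Dict.getD_insert_of_ne _ _ _ (by decide : ("what_works":String) ≠ "suggestions"),
    PySem.Dict.getD_insert_of_ne _ _ _ (by decide : ("what_needs_work":String) ≠ "suggestions")]
  rw [pv_padWorks_eq _ (pv_len_slice3 _), pv_padConst_eq _ _ (pv_len_slice2 _),
      pv_padConst_eq _ _ (pv_len_slice2 _)]
  exact congrArg PySem.Dict.items (pv_chain _ _ _ _ _ _ _)
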